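-- pv_equiv track=rewrite | github.com/fhta0/doc-helper | backend/app/services/rule_engine.py | _merge_consecutive_runs
-- ===== SOURCE A (Python) =====
-- from typing import Dict, List, Any, Optional
--
-- def _merge_consecutive_runs(run_locs: List[Dict[str, Any]]) -> List[str]:
--     """
--     Merge consecutive run locations by paragraph index.
--
--     Args:
--         run_locs: List of run location dictionaries sorted by paragraph_index
--
--     Returns:
--         List of merged location strings
--     """
--     if not run_locs:
--         return []
--
--     # Sort and deduplicate by paragraph_index
--     sorted_locs = sorted(run_locs, key=lambda x: x.get("paragraph_index", 0))
--     seen_indices = set()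
--     unique_locs = []
--     for loc in sorted_locs:
--         idx = loc.get("paragraph_index", 0)
--         if idx not in seen_indices:
--             seen_indices.add(idx)
--             unique_locs.append(loc)
--
--     merged = []
--     i = 0
--
--     while i < len(unique_locs):
--         start_idx = unique_locs[i].get("paragraph_index", 0)
--         j = i + 1
--
--         # Find consecutive paragraph indices
--         while j < len(unique_locs):
--             next_idx = unique_locs[j].get("paragraph_index", 0)
--             if next_idx == start_idx + (j - i):
--                 j += 1
--             else:
--                 break
--
--         # Generate merged string
--         if j - i >= 3:
--             # Merge 3 or more consecutive
--             end_idx = unique_locs[j - 1].get("paragraph_index", 0)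
--             merged.append(f"第{start_idx + 1}~{end_idx + 1}段")
--         else:
--             # Show individually
--             for k in range(i, j):
--                 idx = unique_locs[k].get("paragraph_index", 0)
--                 merged.append(f"第{idx + 1}段")
--
--         i = j
--
--     return merged
-- ===== SOURCE B (Python) =====
-- from typing import Dict, List, Any
--
--
-- def _merge_consecutive_runs(run_locs: List[Dict[str, Any]]) -> List[str]:
--     """Reduce to the sorted set of paragraph indices, then split it into
--     maximal consecutive runs and format each run."""
--     indices = sorted({loc.get("paragraph_index", 0) for loc in run_locs})
--     return _emit(indices)
--
--
-- def _emit(indices: List[int]) -> List[str]: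
--     if not indices:
--         return []
--     n = 1
--     while n < len(indices) and indices[n] == indices[n - 1] + 1:
--         n += 1
--     if n >= 3:
--         head = [f"第{indices[0] + 1}~{indices[n - 1] + 1}段"]
--     else:
--         head = [f"第{idx + 1}段" for idx in indices[:n]]
--     return head + _emit(indices[n:])
-- ===== Notes on version B (the rewrite author's own statement) =====
-- stated objective: simpler
-- what changed: Replaces the stable dict sort + seen-set dedup pass + intertwined i/j pointer walk over location dicts with sorted(set(...)) over the bare integer indices followed by a recursive split of that strictly increasing list into maximal consecutive runs.
import Mathlib
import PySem

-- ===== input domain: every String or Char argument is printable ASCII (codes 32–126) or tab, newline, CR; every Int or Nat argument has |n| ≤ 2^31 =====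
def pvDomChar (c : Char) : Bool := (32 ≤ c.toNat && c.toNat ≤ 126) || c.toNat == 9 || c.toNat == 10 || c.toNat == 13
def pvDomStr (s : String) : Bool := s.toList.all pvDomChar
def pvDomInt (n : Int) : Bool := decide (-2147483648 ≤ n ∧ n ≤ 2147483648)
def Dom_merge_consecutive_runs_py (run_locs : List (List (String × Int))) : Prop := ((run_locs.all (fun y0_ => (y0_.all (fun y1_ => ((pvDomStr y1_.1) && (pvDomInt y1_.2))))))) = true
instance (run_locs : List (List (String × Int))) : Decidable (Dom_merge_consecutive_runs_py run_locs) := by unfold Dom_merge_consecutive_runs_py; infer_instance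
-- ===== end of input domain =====

-- B replaces A's dict sort + seen-set dedup pass + i/j pointer walk by sorted(set(indices))
-- followed by a recursive split into maximal consecutive runs (objective: simpler).

-- shared helper: loc.get("paragraph_index", 0)
def pvKey (loc : List (String × Int)) : Int := PySem.Dict.getD (PySem.Dict.mk loc) "paragraph_index" 0

-- ===== PORT A =====
-- the dedup loop: seen = set(), unique = []
def pvDedup (locs : List (List (String × Int))) (seen : PySem.Set Int) (unique : List (List (String × Int))) : List (List (String × Int)) :=
  match locs with
  | [] => unique
  | loc :: rest =>
    if PySem.Set.contains seen (pvKey loc) then pvDedup rest seen unique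
    else pvDedup rest (PySem.Set.add seen (pvKey loc)) (unique ++ [loc])

-- inner while loop; fuel only makes the recursion structural, it never runs out
def pvInner (u : List (List (String × Int))) (start_idx : Int) (i j : Nat) (fuel : Nat) : Nat :=
  match fuel with
  | 0 => j
  | fuel + 1 =>
    if j < u.length then
      if pvKey (u.getD j []) = start_idx + ((j : Int) - (i : Int)) then pvInner u start_idx i (j + 1) fuel
      else j
    else j

-- outer while loop
def pvOuter (u : List (List (String × Int))) (i : Nat) (merged : List String) (fuel : Nat) : List String :=
  match fuel with
  | 0 => merged
  | fuel + 1 =>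
    if i < u.length then
      let start_idx := pvKey (u.getD i [])
      let j := pvInner u start_idx i (i + 1) u.length
      pvOuter u j
        (if 3 ≤ (j : Int) - (i : Int) then
          merged ++ ["第" ++ PySem.Int.toStr (start_idx + 1) ++ "~" ++ PySem.Int.toStr (pvKey (u.getD (j - 1) []) + 1) ++ "段"]
        else
          merged ++ (List.range' i (j - i)).map (fun k => "第" ++ PySem.Int.toStr (pvKey (u.getD k []) + 1) ++ "段")) fuel
    else merged

def merge_consecutive_runs_py (run_locs : List (List (String × Int))) : List String :=
  if run_locs.length = 0 then []
  else
    let u := pvDedup (PySem.List.sorted run_locs pvKey false) PySem.Set.empty []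
    pvOuter u 0 [] (u.length + 1)

-- ===== PORT B =====
-- n = 1; while n < len(indices) and indices[n] == indices[n-1] + 1: n += 1
def pvRunLen (indices : List Int) (n : Nat) (fuel : Nat) : Nat :=
  match fuel with
  | 0 => n
  | fuel + 1 =>
    if n < indices.length ∧ indices.getD n 0 = indices.getD (n - 1) 0 + 1 then pvRunLen indices (n + 1) fuel
    else n

-- _emit: format the maximal consecutive run at the front, recurse on the rest
def pvEmit (indices : List Int) (fuel : Nat) : List String :=
  match fuel with
  | 0 => []
  | fuel + 1 =>
    if indices.length = 0 then []
    else
      let n := pvRunLen indices 1 indices.length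
      (if 3 ≤ n then
        ["第" ++ PySem.Int.toStr (indices.getD 0 0 + 1) ++ "~" ++ PySem.Int.toStr (indices.getD (n - 1) 0 + 1) ++ "段"]
      else
        (indices.take n).map (fun idx => "第" ++ PySem.Int.toStr (idx + 1) ++ "段"))
      ++ pvEmit (indices.drop n) fuel

def merge_consecutive_runs_py_alt (run_locs : List (List (String × Int))) : List String :=
  pvEmit (PySem.List.sorted (PySem.Set.ofList (run_locs.map pvKey)) (fun x => x) false)
    ((PySem.List.sorted (PySem.Set.ofList (run_locs.map pvKey)) (fun x => x) false).length + 1)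


-- ===== PRECONDITION & SPEC =====
def Spec_merge_consecutive_runs_py (run_locs : List (List (String × Int))) (out : List String) : Prop := out = merge_consecutive_runs_py_alt run_locs
instance (run_locs : List (List (String × Int))) (out : List String) : Decidable (Spec_merge_consecutive_runs_py run_locs out) := by unfold Spec_merge_consecutive_runs_py; infer_instance

-- ===== CLAIM (what is proved, stated in full; the proofs are below) =====
def Claim_equal_merge_consecutive_runs_py : Prop := ∀ (run_locs : List (List (String × Int))), Dom_merge_consecutive_runs_py run_locs → Spec_merge_consecutive_runs_py run_locs (merge_consecutive_runs_py run_locs)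

-- ===== LEMMAS AND PROOFS =====

theorem pvRunLen_ge (indices : List Int) (n fuel : Nat) : n ≤ pvRunLen indices n fuel := by
  induction fuel generalizing n with
  | zero => simp [pvRunLen]
  | succ fuel ih =>
    rw [pvRunLen]
    split
    · have := ih (n + 1); omega
    · exact le_refl n

theorem pvRunLen_le (indices : List Int) (n fuel : Nat) (h : n ≤ indices.length) : pvRunLen indices n fuel ≤ indices.length := by
  induction fuel generalizing n with
  | zero => simpa [pvRunLen] using h
  | succ fuel ih =>
    rw [pvRunLen]
    split
    · next hc => exact ih (n + 1) (by omega)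
    · exact h

theorem drop_map_getD (u : List (List (String × Int))) (i k : Nat) (h : i + k < u.length) :
    ((u.map pvKey).drop i).getD k 0 = pvKey (u.getD (i + k) []) := by
  rw [List.getD_eq_getElem?_getD, List.getD_eq_getElem?_getD]
  rw [List.getElem?_drop, List.getElem?_map]
  rw [List.getElem?_eq_getElem (by simpa using h)]
  simp

theorem inner_run (u : List (List (String × Int))) (i : Nat) (fa : Nat) :
    ∀ (j fb : Nat), i < j → j ≤ u.length → u.length - j ≤ fa → u.length - j ≤ fb →
    (∀ m, i ≤ m → m < j → pvKey (u.getD m []) = pvKey (u.getD i []) + ((m : Int) - (i : Int))) →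
    pvInner u (pvKey (u.getD i [])) i j fa = i + pvRunLen ((u.map pvKey).drop i) (j - i) fb := by
  induction fa with
  | zero =>
    intro j fb hij hj hfa hfb hinv
    have hjlen : j = u.length := by omega
    rw [pvInner]
    match fb, hfb with
    | 0, _ => rw [pvRunLen]; omega
    | fb + 1, _ =>
      rw [pvRunLen]
      rw [if_neg (by
        rintro ⟨h1, -⟩
        have : ((u.map pvKey).drop i).length = u.length - i := by simp
        omega)]
      omega
  | succ fa ih =>
    intro j fb hij hj hfa hfb hinv
    have hlen : ((u.map pvKey).drop i).length = u.length - i := by simp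
    rw [pvInner]
    by_cases hlt : j < u.length
    · have e1 : ((u.map pvKey).drop i).getD (j - i) 0 = pvKey (u.getD j []) := by
        have h0 := drop_map_getD u i (j - i) (by omega)
        rwa [show i + (j - i) = j by omega] at h0
      have e2 : ((u.map pvKey).drop i).getD (j - i - 1) 0 = pvKey (u.getD (j - 1) []) := by
        have h0 := drop_map_getD u i (j - i - 1) (by omega)
        rwa [show i + (j - i - 1) = j - 1 by omega] at h0
      have hprev : pvKey (u.getD (j - 1) []) = pvKey (u.getD i []) + (((j - 1 : Nat) : Int) - (i : Int)) :=
        hinv (j - 1) (by omega) (by omega)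
      match fb, hfb with
      | 0, hfb => exact absurd hlt (by omega)
      | fb + 1, hfb =>
        rw [pvRunLen, if_pos hlt]
        by_cases hc : pvKey (u.getD j []) = pvKey (u.getD i []) + ((j : Int) - (i : Int))
        · rw [if_pos hc]
          rw [if_pos (show j - i < ((u.map pvKey).drop i).length ∧
                ((u.map pvKey).drop i).getD (j - i) 0 = ((u.map pvKey).drop i).getD (j - i - 1) 0 + 1 by
              refine ⟨by omega, ?_⟩
              rw [e1, e2, hprev]
              omega)]
          have := ih (j + 1) fb (by omega) (by omega) (by omega) (by omega)
            (by intro m hm1 hm2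
                by_cases hmj : m < j
                · exact hinv m hm1 hmj
                · have : m = j := by omega
                  subst this; exact hc)
          rw [this, show j + 1 - i = j - i + 1 by omega]
        · rw [if_neg hc]
          rw [if_neg (show ¬(j - i < ((u.map pvKey).drop i).length ∧
                ((u.map pvKey).drop i).getD (j - i) 0 = ((u.map pvKey).drop i).getD (j - i - 1) 0 + 1) by
              rintro ⟨-, hcc⟩
              rw [e1, e2, hprev] at hcc
              omega)]
          omega
    · rw [if_neg hlt]
      match fb, hfb with
      | 0, _ => rw [pvRunLen]; omega
      | fb + 1, _ =>
        rw [pvRunLen]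
        rw [if_neg (by rintro ⟨h1, -⟩; omega)]
        omega

theorem outer_emit (u : List (List (String × Int))) (fa : Nat) :
    ∀ (i : Nat) (merged : List String) (fb : Nat), i ≤ u.length → u.length - i < fa → u.length - i < fb →
    pvOuter u i merged fa = merged ++ pvEmit ((u.map pvKey).drop i) fb := by
  induction fa with
  | zero => intro i merged fb hi hfa hfb; omega
  | succ fa ih =>
    intro i merged fb hi hfa hfb
    have hlen : ((u.map pvKey).drop i).length = u.length - i := by simp
    rw [pvOuter]
    by_cases hlt : i < u.length
    · rw [if_pos hlt]
      simp only []
      have hn1 : 1 ≤ pvRunLen ((u.map pvKey).drop i) 1 ((u.map pvKey).drop i).length :=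
        pvRunLen_ge _ 1 _
      have hnle : pvRunLen ((u.map pvKey).drop i) 1 ((u.map pvKey).drop i).length ≤ ((u.map pvKey).drop i).length :=
        pvRunLen_le _ 1 _ (by omega)
      set n := pvRunLen ((u.map pvKey).drop i) 1 ((u.map pvKey).drop i).length with hn
      have hjeq : pvInner u (pvKey (u.getD i [])) i (i + 1) u.length = i + n := by
        rw [inner_run u i u.length (i + 1) ((u.map pvKey).drop i).length (by omega) (by omega) (by omega) (by omega)
          (by intro m h1 h2
              have : m = i := by omega
              subst this; simp)]
        rw [show i + 1 - i = 1 by omega, hn]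
      rw [hjeq]
      match fb, hfb with
      | fb + 1, hfb =>
        rw [ih (i + n) _ fb (by omega) (by omega) (by omega)]
        conv_rhs => rw [pvEmit]
        rw [if_neg (show ¬((u.map pvKey).drop i).length = 0 by omega)]
        simp only [← hn]
        rw [List.drop_drop]
        have hhead : (if 3 ≤ ((i + n : Nat) : Int) - (i : Int) then
              merged ++ ["第" ++ PySem.Int.toStr (pvKey (u.getD i []) + 1) ++ "~" ++ PySem.Int.toStr (pvKey (u.getD (i + n - 1) []) + 1) ++ "段"]
            else
              merged ++ (List.range' i (i + n - i)).map (fun k => "第" ++ PySem.Int.toStr (pvKey (u.getD k []) + 1) ++ "段"))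
            = merged ++ (if 3 ≤ n then
              ["第" ++ PySem.Int.toStr (((u.map pvKey).drop i).getD 0 0 + 1) ++ "~" ++ PySem.Int.toStr (((u.map pvKey).drop i).getD (n - 1) 0 + 1) ++ "段"]
            else
              (((u.map pvKey).drop i).take n).map (fun idx => "第" ++ PySem.Int.toStr (idx + 1) ++ "段")) := by
          by_cases h3 : 3 ≤ n
          · rw [if_pos (show 3 ≤ ((i + n : Nat) : Int) - (i : Int) by push_cast; omega), if_pos h3]
            have e0 : ((u.map pvKey).drop i).getD 0 0 = pvKey (u.getD i []) := by
              have h0 := drop_map_getD u i 0 (by omega)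
              rwa [Nat.add_zero] at h0
            have e1 : ((u.map pvKey).drop i).getD (n - 1) 0 = pvKey (u.getD (i + n - 1) []) := by
              have h0 := drop_map_getD u i (n - 1) (by omega)
              rwa [show i + (n - 1) = i + n - 1 by omega] at h0
            rw [e0, e1]
          · rw [if_neg (show ¬(3 ≤ ((i + n : Nat) : Int) - (i : Int)) by push_cast; omega), if_neg h3]
            congr 1
            apply List.ext_getElem
            · simp; omega
            · intro m hm1 hm2
              simp only [List.getElem_map, List.getElem_range', List.getElem_take, List.getElem_drop]
              have hmn : m < n := by simpa using hm1
              have hrange : i + m < u.length := by omega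
              congr 3
              rw [show i + 1 * m = i + m by omega, List.getD_eq_getElem _ _ (by omega)]
        rw [hhead, List.append_assoc]
    · rw [if_neg hlt]
      have hd : (u.map pvKey).drop i = [] := by
        apply List.drop_eq_nil_of_le; simp; omega
      rw [hd]
      match fb, hfb with
      | fb + 1, _ =>
        rw [pvEmit]
        simp

theorem dedup_spec (locs : List (List (String × Int))) (seen : PySem.Set Int) (unique : List (List (String × Int)))
    (hnd : (unique.map pvKey).Nodup)
    (hseen : ∀ x, PySem.Set.contains seen x = true ↔ x ∈ unique.map pvKey) :
    ((pvDedup locs seen unique).map pvKey).Nodup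
    ∧ (∀ x, x ∈ (pvDedup locs seen unique).map pvKey ↔ x ∈ unique.map pvKey ∨ x ∈ locs.map pvKey)
    ∧ ∃ t, pvDedup locs seen unique = unique ++ t ∧ t.Sublist locs := by
  induction locs generalizing seen unique with
  | nil =>
    simp only [pvDedup]
    exact ⟨hnd, by simp, [], by simp, List.Sublist.refl []⟩
  | cons loc rest ih =>
    rw [pvDedup]
    split
    · next hc =>
      have hmem : pvKey loc ∈ unique.map pvKey := (hseen _).mp hc
      obtain ⟨h1, h2, t, ht, hts⟩ := ih seen unique hnd hseen
      refine ⟨h1, ?_, t, ht, hts.cons loc⟩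
      intro x
      rw [h2 x]
      constructor
      · rintro (h | h) <;> simp_all
      · rintro (h | h)
        · exact Or.inl h
        · simp only [List.map_cons, List.mem_cons] at h
          rcases h with h | h
          · exact Or.inl (h ▸ hmem)
          · exact Or.inr h
    · next hc =>
      have hnotmem : pvKey loc ∉ unique.map pvKey := fun h => hc ((hseen _).mpr h)
      have hnd' : ((unique ++ [loc]).map pvKey).Nodup := by
        simp only [List.map_append, List.map_cons, List.map_nil]
        refine List.nodup_append.mpr ⟨hnd, List.nodup_singleton _, ?_⟩
        intro a ha b hb heq
        exact hnotmem ((heq.trans (List.mem_singleton.mp hb)) ▸ ha)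
      have hseen' : ∀ x, PySem.Set.contains (PySem.Set.add seen (pvKey loc)) x = true ↔ x ∈ (unique ++ [loc]).map pvKey := by
        intro x
        rw [show (PySem.Set.contains (PySem.Set.add seen (pvKey loc)) x = true) ↔ x ∈ PySem.Set.add seen (pvKey loc) from by simp [PySem.Set.contains]]
        rw [PySem.Set.mem_add]
        have hx := hseen x
        rw [show (PySem.Set.contains seen x = true) ↔ x ∈ seen from by simp [PySem.Set.contains]] at hx
        simp only [List.map_append, List.map_cons, List.map_nil, List.mem_append, List.mem_singleton]
        exact or_congr hx Iff.rfl
      obtain ⟨h1, h2, t, ht, hts⟩ := ih _ _ hnd' hseen'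
      refine ⟨h1, ?_, loc :: t, by simpa using ht, hts.cons₂ loc⟩
      intro x
      rw [h2 x]
      simp only [List.map_append, List.map_cons, List.map_nil, List.mem_append, List.mem_cons]
      tauto

theorem keys_eq (run_locs : List (List (String × Int))) :
    PySem.List.sorted (PySem.Set.ofList (run_locs.map pvKey)) (fun x => x) false
      = (pvDedup (PySem.List.sorted run_locs pvKey false) PySem.Set.empty []).map pvKey := by
  obtain ⟨hnd, hmem, t, ht, hts⟩ := dedup_spec (PySem.List.sorted run_locs pvKey false) PySem.Set.empty []
    (by simp) (by intro x; simp [PySem.Set.contains, PySem.Set.empty])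
  apply PySem.List.sorted_eq_of_perm_of_pairwise_lt
  · rw [List.perm_ext_iff_of_nodup hnd (PySem.Set.nodup_ofList _)]
    intro a
    rw [PySem.Set.mem_ofList, hmem a]
    have hp : ((PySem.List.sorted run_locs pvKey false).map pvKey).Perm (run_locs.map pvKey) :=
      (PySem.List.sorted_perm run_locs pvKey false).map pvKey
    simp [hp.mem_iff]
  · have hple : List.Pairwise (fun a b => pvKey a ≤ pvKey b) (PySem.List.sorted run_locs pvKey false) :=
      PySem.List.sorted_pairwise run_locs pvKey
    have hu : (pvDedup (PySem.List.sorted run_locs pvKey false) PySem.Set.empty []).Sublist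
        (PySem.List.sorted run_locs pvKey false) := by
      rw [ht]; simpa using hts
    have h1 := List.Pairwise.sublist hu hple
    have h2 : List.Pairwise (· ≤ ·) ((pvDedup (PySem.List.sorted run_locs pvKey false) PySem.Set.empty []).map pvKey) :=
      List.pairwise_map.mpr h1
    exact (h2.and hnd).imp (fun h => lt_of_le_of_ne h.1 h.2)

-- ===== VERDICT (by name: the statement is the Claim_ definition above) =====
theorem merge_consecutive_runs_py_spec : Claim_equal_merge_consecutive_runs_py := by
  intro run_locs _
  unfold Spec_merge_consecutive_runs_py merge_consecutive_runs_py merge_consecutive_runs_py_alt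
  rw [keys_eq]
  split
  · next h =>
    have : run_locs = [] := List.length_eq_zero_iff.mp h
    subst this
    show ([] : List String) = pvEmit [] 1
    rw [pvEmit]
    simp
  · simp only []
    rw [outer_emit _ _ 0 []
      (((pvDedup (PySem.List.sorted run_locs pvKey false) PySem.Set.empty []).map pvKey).length + 1)
      (by omega) (by simp) (by simp)]
    simp
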